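-- pv_equiv track=rewrite | github.com/miguelTavora/Artificial-Intelligence-2 | state_space_search/otimizacao/src/lib/n_queens/problem_queen.py | __cost_perpendicular
-- ===== SOURCE A (Python) =====
-- def __cost_perpendicular(solution):
--
--     found = []
--     cost = 0
--     for i in range(len(solution) - 1):
--
--         # not found already detected pieces
--         if solution[i] not in found:
--
--             for j in range(i + 1, len(solution)):
--                 # when the number is equal is a colision
--                 if solution[i] == solution[j]:
--                     cost += 1
--
--             # add to the list to prevent double count
--             found.append(solution[i])
--
--     return cost
-- ===== SOURCE B (Python) =====
-- def __cost_perpendicular(solution):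
--     # collisions per row = total queens minus distinct row values
--     return len(solution) - len(set(solution))
-- ===== Notes on version B (the rewrite author's own statement) =====
-- stated objective: faster
-- what changed: Replaced the nested pairwise scan with the closed form len(solution) - len(set(solution)): each duplicated value contributes (occurrences - 1) collisions, which sums to n minus the number of distinct values.
import Mathlib
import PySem

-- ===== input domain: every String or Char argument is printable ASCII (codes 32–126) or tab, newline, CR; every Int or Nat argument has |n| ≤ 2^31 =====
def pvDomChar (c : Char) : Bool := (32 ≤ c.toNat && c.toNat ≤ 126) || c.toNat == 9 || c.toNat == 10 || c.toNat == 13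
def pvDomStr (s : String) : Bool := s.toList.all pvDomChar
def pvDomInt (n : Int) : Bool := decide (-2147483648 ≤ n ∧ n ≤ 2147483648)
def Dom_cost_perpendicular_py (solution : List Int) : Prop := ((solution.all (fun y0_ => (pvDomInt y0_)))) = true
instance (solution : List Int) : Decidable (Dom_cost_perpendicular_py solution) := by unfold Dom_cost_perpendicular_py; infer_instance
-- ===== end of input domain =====

-- B replaces A's nested pairwise scan by the closed form len(solution) - len(set(solution)) (objective: faster).

-- ===== PORT A =====
-- body of A's outer loop: if solution[i] not in found, count equal later values (inner j-loop
-- accumulating onto cost) and append solution[i] to found.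
def pvStepA (solution : List Int) (n : Int) (st : List Int × Int) (i : Int) : List Int × Int :=
  let v := PySem.List.pyGetD solution i 0   -- solution[i]; i is always in range here
  if v ∈ st.1 then st
  else (st.1 ++ [v],
    (PySem.List.pyRange (i + 1) n 1).foldl
      (fun c j => if v = PySem.List.pyGetD solution j 0 then c + 1 else c) st.2)

-- literal transliteration of A: for i in range(len(solution) - 1), carrying (found, cost).
def cost_perpendicular_py (solution : List Int) : Int :=
  let n : Int := (solution.length : Int)
  ((PySem.List.pyRange 0 (n - 1) 1).foldl (pvStepA solution n) ([], 0)).2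

-- ===== PORT B =====
def cost_perpendicular_py_alt (solution : List Int) : Int :=
  (solution.length : Int) - ((PySem.Set.ofList solution).length : Int)

-- ===== PRECONDITION & SPEC =====
def Spec_cost_perpendicular_py (solution : List Int) (out : Int) : Prop := out = cost_perpendicular_py_alt solution
instance (solution : List Int) (out : Int) : Decidable (Spec_cost_perpendicular_py solution out) := by unfold Spec_cost_perpendicular_py; infer_instance

-- ===== CLAIM (what is proved, stated in full; the proofs are below) =====
def Claim_equal_cost_perpendicular_py : Prop := ∀ (solution : List Int), Dom_cost_perpendicular_py solution → Spec_cost_perpendicular_py solution (cost_perpendicular_py solution)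

-- ===== LEMMAS AND PROOFS =====

lemma pvRangeSelf (a : Int) : PySem.List.pyRange a a 1 = [] := by
  simp [pysem]

-- Structural model of A's outer loop: for the suffix t still to be processed, with `f` the
-- current `found` list, the cost added is the number of later duplicates of each new value.
def pvModel (f : List Int) : List Int → Int
  | [] => 0
  | x :: xs => if x ∈ f then pvModel f xs else (xs.count x : Int) + pvModel (f ++ [x]) xs

-- A's inner j-loop, starting right after a prefix `pre`, counts occurrences of v in the suffix t.
lemma pvInner (v : Int) : ∀ (t pre : List Int) (c : Int),
    (PySem.List.pyRange (pre.length : Int) (((pre ++ t).length : Int)) 1).foldl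
      (fun c j => if v = PySem.List.pyGetD (pre ++ t) j 0 then c + 1 else c) c
    = c + (t.count v : Int) := by
  intro t
  induction t with
  | nil =>
    intro pre c
    rw [List.append_nil, pvRangeSelf]
    simp
  | cons x xs ih =>
    intro pre c
    have hlt : (pre.length : Int) < (((pre ++ x :: xs).length : Int)) := by
      simp [List.length_append]
    have hg : PySem.List.pyGetD (pre ++ x :: xs) (pre.length : Int) 0 = x := by
      rw [PySem.List.pyGetD_natCast]
      simp
    have hlen : (((pre ++ [x]).length : Nat) : Int) = (pre.length : Int) + 1 := by
      simp
    rw [PySem.List.pyRange_one_cons hlt, List.foldl_cons, hg]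
    have key := ih (pre ++ [x]) (if v = x then c + 1 else c)
    simp only [List.append_assoc, List.singleton_append] at key
    rw [hlen] at key
    rw [key]
    rcases eq_or_ne v x with hvx | hvx
    · subst hvx
      rw [if_pos rfl]
      simp
      try omega
    · have hb : (x == v) = false := beq_eq_false_iff_ne.mpr (Ne.symm hvx)
      rw [if_neg hvx]
      simp [List.count_cons, hb]

-- A's outer loop over the suffix t equals the structural model.
lemma pvOuter : ∀ (t pre f : List Int) (c : Int),
    ((PySem.List.pyRange (pre.length : Int) (((pre ++ t).length : Int)) 1).foldl
      (pvStepA (pre ++ t) (((pre ++ t).length : Int))) (f, c)).2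
    = c + pvModel f t := by
  intro t
  induction t with
  | nil =>
    intro pre f c
    rw [List.append_nil, pvRangeSelf, List.foldl_nil]
    simp [pvModel]
  | cons x xs ih =>
    intro pre f c
    have hlt : (pre.length : Int) < (((pre ++ x :: xs).length : Int)) := by
      simp [List.length_append]
    have hg : PySem.List.pyGetD (pre ++ x :: xs) (pre.length : Int) 0 = x := by
      rw [PySem.List.pyGetD_natCast]
      simp
    have hlen : (((pre ++ [x]).length : Nat) : Int) = (pre.length : Int) + 1 := by
      simp
    rw [PySem.List.pyRange_one_cons hlt, List.foldl_cons]
    by_cases hx : x ∈ f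
    · have hstep : pvStepA (pre ++ x :: xs) (((pre ++ x :: xs).length : Int)) (f, c) (pre.length : Int)
          = (f, c) := by
        simp only [pvStepA, hg]
        rw [if_pos hx]
      rw [hstep]
      have key := ih (pre ++ [x]) f c
      simp only [List.append_assoc, List.singleton_append] at key
      rw [hlen] at key
      rw [key]
      simp [pvModel, hx]
    · have hin := pvInner x xs (pre ++ [x]) c
      simp only [List.append_assoc, List.singleton_append] at hin
      rw [hlen] at hin
      have hstep : pvStepA (pre ++ x :: xs) (((pre ++ x :: xs).length : Int)) (f, c) (pre.length : Int)
          = (f ++ [x], c + (xs.count x : Int)) := by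
        simp only [pvStepA, hg]
        rw [if_neg hx, hin]
      rw [hstep]
      have key := ih (pre ++ [x]) (f ++ [x]) (c + (xs.count x : Int))
      simp only [List.append_assoc, List.singleton_append] at key
      rw [hlen] at key
      rw [key]
      simp only [pvModel]
      rw [if_neg hx]
      ring

-- A's last outer index (i = n-1, skipped by range(len-1)) never changes the cost: its inner range is empty.
lemma pvTrunc (solution : List Int) :
    cost_perpendicular_py solution
    = ((PySem.List.pyRange 0 ((solution.length : Int)) 1).foldl
        (pvStepA solution ((solution.length : Int))) ([], 0)).2 := by
  cases solution with
  | nil => rfl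
  | cons y ys =>
    have hn : (0 : Int) ≤ (((y :: ys).length : Int)) - 1 := by
      simp only [List.length_cons]
      push_cast
      omega
    have hsplit : PySem.List.pyRange 0 (((y :: ys).length : Int)) 1
        = PySem.List.pyRange 0 ((((y :: ys).length : Int)) - 1) 1 ++ [(((y :: ys).length : Int)) - 1] := by
      have h := PySem.List.pyRange_one_succ_right (a := 0) (b := (((y :: ys).length : Int)) - 1) hn
      rw [show (((y :: ys).length : Int)) - 1 + 1 = (((y :: ys).length : Int)) by ring] at h
      exact h
    have hlast : ∀ st : List Int × Int,
        (pvStepA (y :: ys) (((y :: ys).length : Int)) st ((((y :: ys).length : Int)) - 1)).2 = st.2 := by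
      intro st
      have hempty : PySem.List.pyRange ((((y :: ys).length : Int)) - 1 + 1) (((y :: ys).length : Int)) 1 = [] := by
        rw [show (((y :: ys).length : Int)) - 1 + 1 = (((y :: ys).length : Int)) by ring]
        exact pvRangeSelf _
      simp only [pvStepA, hempty, List.foldl_nil]
      split <;> rfl
    simp only [cost_perpendicular_py]
    rw [hsplit, List.foldl_append, List.foldl_cons, List.foldl_nil, hlast]

-- Splitting a filtered length at a fresh value x: elements ∉ f are either = x (count x) or ∉ f++[x].
lemma pvFilterSplit (f : List Int) (x : Int) (hx : x ∉ f) : ∀ xs : List Int,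
    (xs.filter (fun v => decide (v ∉ f))).length
    = xs.count x + (xs.filter (fun v => decide (v ∉ f ++ [x]))).length := by
  intro xs
  induction xs with
  | nil => simp
  | cons y ys ih =>
    rw [List.filter_cons, List.filter_cons, List.count_cons]
    by_cases hyf : y ∈ f
    · have c1 : (decide (y ∉ f)) = false := by simp [hyf]
      have c2 : (decide (y ∉ f ++ [x])) = false := by simp [hyf]
      have c3 : (y == x) = false := beq_eq_false_iff_ne.mpr (fun h => hx (h ▸ hyf))
      rw [c1, c2, c3]
      simpa using ih
    · by_cases hyx : y = x
      · subst hyx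
        have c1 : (decide (y ∉ f)) = true := by simp [hyf]
        have c2 : (decide (y ∉ f ++ [y])) = false := by simp
        have c3 : (y == y) = true := beq_self_eq_true y
        rw [c1, c2, c3]
        simp only [if_true, Bool.false_eq_true, if_false, List.length_cons]
        omega
      · have c1 : (decide (y ∉ f)) = true := by simp [hyf]
        have c2 : (decide (y ∉ f ++ [x])) = true := by simp [hyf, hyx]
        have c3 : (y == x) = false := beq_eq_false_iff_ne.mpr hyx
        rw [c1, c2, c3]
        simp only [if_true, Bool.false_eq_true, if_false, List.length_cons]
        omega

-- The model in closed form: (elements not yet found) minus (distinct values not yet found).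
lemma pvModelClosed : ∀ (t f : List Int),
    pvModel f t = ((t.filter (fun v => decide (v ∉ f))).length : Int)
      - ((t.toFinset \ f.toFinset).card : Int) := by
  intro t
  induction t with
  | nil => intro f; simp [pvModel]
  | cons x xs ih =>
    intro f
    by_cases hx : x ∈ f
    · have hset : (insert x xs.toFinset) \ f.toFinset = xs.toFinset \ f.toFinset := by
        ext b
        simp only [Finset.mem_sdiff, Finset.mem_insert, List.mem_toFinset]
        constructor
        · rintro ⟨hb1 | hb2, hb3⟩
          · exact absurd (hb1 ▸ hx) hb3
          · exact ⟨hb2, hb3⟩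
        · rintro ⟨hb, hb3⟩; exact ⟨Or.inr hb, hb3⟩
      have c1 : (decide (x ∉ f)) = false := by simp [hx]
      rw [List.filter_cons, c1, List.toFinset_cons, hset]
      simp only [Bool.false_eq_true, if_false]
      rw [show pvModel f (x :: xs) = pvModel f xs from by simp [pvModel, hx]]
      exact ih f
    · have hS : (insert x xs.toFinset) \ f.toFinset = insert x (xs.toFinset \ f.toFinset) := by
        ext b
        simp only [Finset.mem_sdiff, Finset.mem_insert, List.mem_toFinset]
        constructor
        · rintro ⟨hb1 | hb2, hb3⟩
          · exact Or.inl hb1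
          · exact Or.inr ⟨hb2, hb3⟩
        · rintro (hb | ⟨hb, hb3⟩)
          · exact ⟨Or.inl hb, hb ▸ hx⟩
          · exact ⟨Or.inr hb, hb3⟩
      have hE : xs.toFinset \ (f ++ [x]).toFinset = (xs.toFinset \ f.toFinset).erase x := by
        ext b
        simp only [Finset.mem_sdiff, Finset.mem_erase, List.mem_toFinset, List.mem_append,
          List.mem_singleton]
        tauto
      have hcard : (insert x (xs.toFinset \ f.toFinset)).card
          = ((xs.toFinset \ f.toFinset).erase x).card + 1 := by
        by_cases hxS : x ∈ xs.toFinset \ f.toFinset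
        · rw [Finset.insert_eq_self.mpr hxS, Finset.card_erase_of_mem hxS]
          have : 0 < (xs.toFinset \ f.toFinset).card := Finset.card_pos.mpr ⟨x, hxS⟩
          omega
        · rw [Finset.card_insert_of_notMem hxS, Finset.erase_eq_of_notMem hxS]
      have c1 : (decide (x ∉ f)) = true := by simp [hx]
      have hfs := pvFilterSplit f x hx xs
      rw [List.filter_cons, c1, List.toFinset_cons, hS, hcard]
      simp only [if_true, List.length_cons]
      rw [show pvModel f (x :: xs) = (xs.count x : Int) + pvModel (f ++ [x]) xs from by
        simp [pvModel, hx]]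
      rw [ih (f ++ [x]), hE]
      omega

lemma pvSetLen (s : List Int) : (PySem.Set.ofList s).length = s.toFinset.card := by
  have h1 : (PySem.Set.ofList s).toFinset = s.toFinset := by
    ext b
    simp [List.mem_toFinset, PySem.Set.mem_ofList]
  have h2 := List.toFinset_card_of_nodup (PySem.Set.nodup_ofList (xs := s))
  rw [← h1, h2]

-- ===== VERDICT (by name: the statement is the Claim_ definition above) =====
theorem cost_perpendicular_py_spec : Claim_equal_cost_perpendicular_py := by
  intro solution _
  unfold Spec_cost_perpendicular_py cost_perpendicular_py_alt
  rw [pvTrunc]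
  have houter := pvOuter solution [] [] 0
  simp only [List.nil_append, List.length_nil, Nat.cast_zero] at houter
  rw [houter, zero_add, pvModelClosed, pvSetLen]
  have hfilter : solution.filter (fun v => decide (v ∉ ([] : List Int))) = solution := by
    simp
  rw [hfilter]
  simp [Finset.sdiff_empty]
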